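-- pv_equiv track=rewrite | github.com/mwagrodzki/codecool_dojos | calendar.py | compact_meetings
-- ===== SOURCE A (Python) =====
-- def compact_meetings(schedule):
--     next_meeting = 8
--     keys = list(schedule.keys())
--     keys.sort()
--     temp = {}
--     for key in keys:
--         duration = schedule[key][0] - key
--         temp[next_meeting] = [next_meeting + duration, schedule[key][1]]
--         next_meeting += duration
--     return temp
-- ===== SOURCE B (Python) =====
-- def compact_meetings(schedule):
--     keys = sorted(schedule)
--
--     def start(i):
--         # where meeting number i begins when everything before it is packed from 8
--         return 8 + sum(schedule[k][0] - k for k in keys[:i])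
--
--     out = {}
--     for i, k in enumerate(keys):
--         out[start(i)] = [start(i) + schedule[k][0] - k, schedule[k][1]]
--     return out
-- ===== Notes on version B (the rewrite author's own statement) =====
-- stated objective: alternative
-- what changed: A's single pass threading a running next_meeting accumulator is replaced by independent per-entry computation: each meeting's start time is recomputed from scratch as 8 plus the sum of the durations of all earlier meetings (keys[:i]), with no state carried between iterations.
import Mathlib
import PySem

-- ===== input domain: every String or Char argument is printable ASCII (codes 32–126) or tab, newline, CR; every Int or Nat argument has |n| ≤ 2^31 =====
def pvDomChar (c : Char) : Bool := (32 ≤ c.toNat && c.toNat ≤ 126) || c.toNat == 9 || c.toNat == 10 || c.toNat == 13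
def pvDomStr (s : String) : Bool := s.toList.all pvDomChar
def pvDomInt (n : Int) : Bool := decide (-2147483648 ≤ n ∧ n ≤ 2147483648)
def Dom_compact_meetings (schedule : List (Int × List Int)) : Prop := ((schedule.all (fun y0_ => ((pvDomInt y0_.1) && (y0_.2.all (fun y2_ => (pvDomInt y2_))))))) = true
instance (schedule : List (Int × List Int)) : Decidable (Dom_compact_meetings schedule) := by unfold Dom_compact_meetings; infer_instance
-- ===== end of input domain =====

-- B drops A's running next_meeting accumulator: each start time is recomputed
-- independently as 8 + the sum of the durations of the earlier meetings (a per-entry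
-- prefix sum over keys[:i]); alternative O(n^2) algorithm, equal return value on Pre_.

-- ===== PORT A =====
-- A's loop: state = (next_meeting, temp); schedule[key][i] is pyGet?; Pre_ makes it `some`,
-- the `.getD 0` fallback is never reached inside Pre_ (Python raises IndexError there).
def compact_meetings (schedule : List (Int × List Int)) : List (Int × List Int) :=
  let d := PySem.Dict.ofList schedule
  let keys := PySem.List.sorted d.keys (fun k => k) false
  let res := keys.foldl
    (fun (st : Int × PySem.Dict Int (List Int)) key =>
      let v := d.getD key []
      let duration := (PySem.List.pyGet? v 0).getD 0 - key
      (st.1 + duration,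
       st.2.insert st.1 [st.1 + duration, (PySem.List.pyGet? v 1).getD 0]))
    (8, PySem.Dict.empty)
  res.2.items

-- ===== PORT B =====
-- Source B: no accumulator; start i = 8 + sum over the slice keys[:i], dict built over
-- enumerate(keys); keys[:i] is PySem.List.slice with upper bound i.
def compact_meetings_alt (schedule : List (Int × List Int)) : List (Int × List Int) :=
  let d := PySem.Dict.ofList schedule
  let keys := PySem.List.sorted d.keys (fun k => k) false
  let start := fun (i : Int) =>
    (8 : Int) + ((PySem.List.slice keys none (some i)).map
      (fun k => (PySem.List.pyGet? (d.getD k []) 0).getD 0 - k)).sum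
  ((PySem.List.enumerate keys 0).foldl
    (fun (t : PySem.Dict Int (List Int)) p =>
      t.insert (start p.1)
        [start p.1 + (PySem.List.pyGet? (d.getD p.2 []) 0).getD 0 - p.2,
         (PySem.List.pyGet? (d.getD p.2 []) 1).getD 0])
    PySem.Dict.empty).items

-- ===== PRECONDITION & SPEC =====
-- Pre_ excludes exactly the inputs where Python A raises IndexError: some meeting's
-- value list (after dict key resolution) has fewer than two elements.
def Pre_compact_meetings (schedule : List (Int × List Int)) : Prop :=
  ∀ p ∈ (PySem.Dict.ofList schedule).items, 2 ≤ p.2.length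
instance (schedule : List (Int × List Int)) : Decidable (Pre_compact_meetings schedule) := by
  unfold Pre_compact_meetings; infer_instance
def pvWitness_compact_meetings : (List (Int × List Int)) := [(9, [10, 1]), (11, [12, 2]), (0, [0, 5])]

def Spec_compact_meetings (schedule : List (Int × List Int)) (out : List (Int × List Int)) : Prop := out = compact_meetings_alt schedule
instance (schedule : List (Int × List Int)) (out : List (Int × List Int)) : Decidable (Spec_compact_meetings schedule out) := by unfold Spec_compact_meetings; infer_instance

-- ===== CLAIM (what is proved, stated in full; the proofs are below) =====
def Claim_equal_compact_meetings : Prop := ∀ (schedule : List (Int × List Int)), Dom_compact_meetings schedule → Pre_compact_meetings schedule → Spec_compact_meetings schedule (compact_meetings schedule)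

-- ===== LEMMAS AND PROOFS =====

-- A's running accumulator at position pre.length equals B's per-entry prefix sum;
-- generic in the per-key duration f and label g. `full` is the fixed sorted key list.
lemma core (f g : Int → Int) (full : List Int) :
    ∀ (ks pre : List Int) (t : PySem.Dict Int (List Int)), full = pre ++ ks →
    (ks.foldl
        (fun (st : Int × PySem.Dict Int (List Int)) k =>
          (st.1 + f k, st.2.insert st.1 [st.1 + f k, g k]))
        (8 + ((full.take pre.length).map f).sum, t)).2
      = (PySem.List.enumerate ks (pre.length : Int)).foldl
          (fun (t : PySem.Dict Int (List Int)) p =>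
            t.insert (8 + ((PySem.List.slice full none (some p.1)).map f).sum)
              [8 + ((PySem.List.slice full none (some p.1)).map f).sum + f p.2, g p.2])
          t := by
  intro ks
  induction ks with
  | nil => intro pre t h; rfl
  | cons k ks ih =>
      intro pre t h
      have hslice : PySem.List.slice full none (some (pre.length : Int)) = full.take pre.length :=
        PySem.List.slice_to_natCast full pre.length
      have htake : full.take pre.length = pre := by
        subst h; simp
      have htake1 : full.take (pre ++ [k]).length = pre ++ [k] := by
        subst h
        rw [show pre ++ k :: ks = (pre ++ [k]) ++ ks from by simp,
          List.take_append_of_le_length (Nat.le_refl _), List.take_length]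
      rw [PySem.List.enumerate_cons, List.foldl_cons, List.foldl_cons]
      simp only [hslice, htake]
      have h' : full = (pre ++ [k]) ++ ks := by simpa using h
      have ihs := ih (pre ++ [k])
        (t.insert (8 + (pre.map f).sum) [8 + (pre.map f).sum + f k, g k]) h'
      rw [htake1] at ihs
      simp only [List.length_append, List.length_cons, List.length_nil,
        Nat.cast_add, Nat.cast_one, List.map_append, List.sum_append, List.map_cons,
        List.map_nil, List.sum_cons, List.sum_nil, add_zero, ← add_assoc] at ihs
      exact ihs

-- ===== VERDICT (by name: the statement is the Claim_ definition above) =====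
theorem compact_meetings_spec : Claim_equal_compact_meetings := by
  intro schedule _ _
  unfold Spec_compact_meetings compact_meetings compact_meetings_alt
  simp only [add_sub_assoc]
  have := core
    (fun k => (PySem.List.pyGet? ((PySem.Dict.ofList schedule).getD k []) 0).getD 0 - k)
    (fun k => (PySem.List.pyGet? ((PySem.Dict.ofList schedule).getD k []) 1).getD 0)
    (PySem.List.sorted (PySem.Dict.ofList schedule).keys (fun k => k) false)
    (PySem.List.sorted (PySem.Dict.ofList schedule).keys (fun k => k) false)
    [] PySem.Dict.empty (by simp)
  simp only [List.length_nil, Nat.cast_zero, List.take_zero, List.map_nil, List.sum_nil,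
    add_zero] at this
  exact congrArg PySem.Dict.items this
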